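-- pv_equiv track=rewrite | github.com/felixarpa/LP-Python | src/test.py | eval_metro
-- ===== SOURCE A (Python) =====
-- def eval_metro(expr, pos):
--     if pos >= len(expr):
--         return ''.join(expr)
--     if expr[pos] == '[' or expr[pos] == ',':
--         expr.insert(pos + 1, '\"')
--         expr.insert(pos + 4, '\"')
--         return eval_metro(expr, pos + 5)
--     else:
--         return eval_metro(expr, pos + 1)
-- ===== SOURCE B (Python) =====
-- # B: pure one-pass structural recursion over the token list; builds the output
-- # string directly instead of A's in-place inserts at shifting indices (return
-- # value only: A mutates expr in place, B does not).
--
-- def _quote(toks):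
--     if not toks:
--         return ''
--     if toks[0] in ('[', ','):
--         return toks[0] + '"' + ''.join(toks[1:3]) + '"' + _quote(toks[3:])
--     return toks[0] + _quote(toks[1:])
--
--
-- def eval_metro(expr, pos):
--     i = max(pos, 0)
--     return ''.join(expr[:i]) + _quote(expr[i:])
-- ===== Notes on version B (the rewrite author's own statement) =====
-- stated objective: simpler
-- what changed: A recursively mutates the list with two inserts at shifting indices and joins at the end; B is a pure one-pass structural recursion over the token list that emits each token (wrapping the two tokens after '['/',' in quotes) directly into the output string, with no mutation.
-- outside the precondition, e.g. on eval_metro(['['], -1): A returns '"["', B returns '[""'; on eval_metro(['x'], -2): A raises IndexError, B returns 'x'; on eval_metro(['[', ''], -2): A returns '[""', B returns '[""'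
import Mathlib
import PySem

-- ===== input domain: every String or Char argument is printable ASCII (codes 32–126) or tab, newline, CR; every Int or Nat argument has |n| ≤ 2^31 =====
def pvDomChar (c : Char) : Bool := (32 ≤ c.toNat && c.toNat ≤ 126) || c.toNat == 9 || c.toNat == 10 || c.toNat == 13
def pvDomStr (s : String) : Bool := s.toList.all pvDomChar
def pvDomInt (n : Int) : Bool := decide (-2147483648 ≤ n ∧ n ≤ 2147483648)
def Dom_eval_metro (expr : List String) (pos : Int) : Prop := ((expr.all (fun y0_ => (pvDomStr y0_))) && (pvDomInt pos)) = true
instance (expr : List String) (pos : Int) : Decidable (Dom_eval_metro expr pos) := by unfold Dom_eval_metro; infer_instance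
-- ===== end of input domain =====

-- B replaces A's recursion with in-place inserts at shifting indices by a pure
-- one-pass structural recursion that emits the output string directly (simpler);
-- equivalence is about the RETURN value only: A mutates expr in place, B does not.

-- ===== PORT A =====
def eval_metro (expr : List String) (pos : Int) : String :=
  if _h : (expr.length : Int) ≤ pos then PySem.Str.join "" expr
  else
    match PySem.List.pyGet? expr pos with
    | none => ""   -- Python raises IndexError here; excluded by Pre_eval_metro
    | some s =>
      if s = "[" ∨ s = "," then
        eval_metro (PySem.List.insert (PySem.List.insert expr (pos + 1) "\"") (pos + 4) "\"") (pos + 5)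
      else
        eval_metro expr (pos + 1)
termination_by ((expr.length : Int) - pos).toNat
decreasing_by
  · simp only [PySem.List.length_insert]
    omega
  · omega

-- ===== PORT B =====
def pvQuote : List String → String
  | [] => ""
  | t :: rest =>
    if t = "[" ∨ t = "," then
      t ++ "\"" ++ PySem.Str.join "" (rest.take 2) ++ "\"" ++ pvQuote (rest.drop 2)
    else
      t ++ pvQuote rest
termination_by toks => toks.length
decreasing_by
  · simp only [List.length_cons, List.length_drop]; omega
  · simp only [List.length_cons]; omega

def eval_metro_alt (expr : List String) (pos : Int) : String :=
  let i : Int := max pos 0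
  PySem.Str.join "" (expr.take i.toNat) ++ pvQuote (expr.drop i.toNat)

-- ===== PRECONDITION & SPEC =====
-- Pre_ excludes negative pos: for pos < -len(expr) A raises IndexError, and for
-- -len(expr) <= pos < 0 A's value is an artefact of Python negative-index wraparound
-- (the opening quote can land left of the marker and tokens are re-scanned from the
-- front), a corner no caller specifies; B simply scans from the start of the list there.
def Pre_eval_metro (expr : List String) (pos : Int) : Prop :=
  0 ≤ pos
instance (expr : List String) (pos : Int) : Decidable (Pre_eval_metro expr pos) := by
  unfold Pre_eval_metro; infer_instance

def pvWitness_eval_metro : List String × Int := (["[", "x", "]"], 0)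

def Spec_eval_metro (expr : List String) (pos : Int) (out : String) : Prop :=
  out = eval_metro_alt expr pos
instance (expr : List String) (pos : Int) (out : String) : Decidable (Spec_eval_metro expr pos out) := by
  unfold Spec_eval_metro; infer_instance

-- ===== CLAIM (what is proved, stated in full; the proofs are below) =====
def Claim_equal_eval_metro : Prop := ∀ (expr : List String) (pos : Int), Dom_eval_metro expr pos → Pre_eval_metro expr pos → Spec_eval_metro expr pos (eval_metro expr pos)

-- ===== LEMMAS AND PROOFS =====

lemma pvJoin_nil : PySem.Str.join "" ([] : List String) = "" := by
  simp [PySem.Str.join, PySem.Chars.join_nil]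

lemma pvJoin_cons (x : String) (l : List String) :
    PySem.Str.join "" (x :: l) = x ++ PySem.Str.join "" l := by
  cases l with
  | nil => simp [PySem.Str.join, PySem.Chars.join_singleton, PySem.Chars.join_nil]
  | cons b t => simp [PySem.Str.join, PySem.Chars.join_cons_cons, String.ofList_append]

lemma pvJoin_append (l m : List String) :
    PySem.Str.join "" (l ++ m) = PySem.Str.join "" l ++ PySem.Str.join "" m := by
  induction l with
  | nil => simp [pvJoin_nil]
  | cons x t ih => simp [pvJoin_cons, ih, String.append_assoc]

lemma pvInsert_eq (xs : List String) (p : Nat) (v : String) :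
    PySem.List.insert xs (p : Int) v = xs.take p ++ v :: xs.drop p := by
  rcases (by omega : p ≤ xs.length ∨ xs.length < p) with h | h
  · exact PySem.List.insert_natCast xs p v h
  · have h1 : xs.take p = xs := List.take_of_length_le (Nat.le_of_lt h)
    have h2 : xs.drop p = [] := List.drop_of_length_le (Nat.le_of_lt h)
    rw [h1, h2]
    simp [PySem.List.insert, PySem.List.sliceIndices]
    rw [if_neg (by omega)]
    have hmin : (min (p:Int) (xs.length:Int)).toNat = xs.length := by omega
    rw [hmin, List.take_length, List.drop_length]

lemma pvTake_app {α : Type} (P l' : List α) (k : Nat) :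
    (P ++ l').take (P.length + k) = P ++ l'.take k := by
  rw [List.take_append]
  simp [List.take_of_length_le]

lemma pvDrop_app {α : Type} (P l' : List α) (k : Nat) :
    (P ++ l').drop (P.length + k) = l'.drop k := by
  rw [List.drop_append]
  simp [List.drop_of_length_le]

lemma eval_metro_ge (xs : List String) (n : Int) (h : (xs.length : Int) ≤ n) :
    eval_metro xs n = PySem.Str.join "" xs := by
  rw [eval_metro]; rw [dif_pos h]

lemma pvQuote_nil : pvQuote [] = "" := by rw [pvQuote]

lemma pvGoAux : ∀ (n : Nat) (R P : List String), R.length ≤ n →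
    eval_metro (P ++ R) (P.length : Int) = PySem.Str.join "" P ++ pvQuote R := by
  intro n
  induction n with
  | zero =>
    intro R P hR
    have hRnil : R = [] := List.eq_nil_of_length_eq_zero (by omega)
    subst hRnil
    rw [eval_metro_ge _ _ (by simp), pvQuote_nil]
    simp
  | succ n ih =>
    intro R P hR
    cases R with
    | nil =>
      rw [eval_metro_ge _ _ (by simp), pvQuote_nil]
      simp
    | cons m R' =>
      have hne : ¬ (((P ++ m :: R').length : Int) ≤ (P.length : Int)) := by
        simp
      rw [eval_metro, dif_neg hne, PySem.List.pyGet?_append_length]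
      simp only []
      by_cases hm : m = "[" ∨ m = ","
      · rw [if_pos hm]
        have c1 : ((P.length : Int) + 1) = ((P.length + 1 : Nat) : Int) := by push_cast; ring
        have e1 : PySem.List.insert (P ++ m :: R') ((P.length : Int) + 1) "\"" =
            (P ++ [m, "\""]) ++ R' := by
          rw [c1, pvInsert_eq]
          have t1 : (P ++ m :: R').take (P.length + 1) = P ++ [m] := by
            rw [pvTake_app]; rfl
          have d1 : (P ++ m :: R').drop (P.length + 1) = R' := by
            rw [pvDrop_app]; rfl
          rw [t1, d1]; simp
        rw [e1]
        have c4 : ((P.length : Int) + 4) = (((P ++ [m, "\""]).length + 2 : Nat) : Int) := by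
          simp; ring
        have e2 : PySem.List.insert ((P ++ [m, "\""]) ++ R') ((P.length : Int) + 4) "\"" =
            (P ++ [m, "\""] ++ R'.take 2 ++ ["\""]) ++ R'.drop 2 := by
          rw [c4, pvInsert_eq, pvTake_app, pvDrop_app]
          simp [List.append_assoc]
        rw [e2]
        by_cases hlen : 2 ≤ R'.length
        · have hplen : (P ++ [m, "\""] ++ R'.take 2 ++ ["\""]).length = P.length + 5 := by
            simp [List.length_take]
            omega
          rw [show (P.length : Int) + 5 = (((P ++ [m, "\""] ++ R'.take 2 ++ ["\""]).length : Nat) : Int) by rw [hplen]; push_cast; ring]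
          rw [ih (R'.drop 2) _ (by simp only [List.length_drop, List.length_cons] at hR ⊢; omega)]
          rw [pvQuote, if_pos hm]
          simp [pvJoin_append, pvJoin_cons, pvJoin_nil, String.append_assoc]
        · have hterm : eval_metro ((P ++ [m, "\""] ++ R'.take 2 ++ ["\""]) ++ R'.drop 2) ((P.length : Int) + 5) =
              PySem.Str.join "" ((P ++ [m, "\""] ++ R'.take 2 ++ ["\""]) ++ R'.drop 2) := by
            apply eval_metro_ge
            simp
            omega
          have hd2 : R'.drop 2 = [] := List.drop_of_length_le (by omega)
          rw [hterm, pvQuote, if_pos hm, hd2, pvQuote_nil]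
          simp [pvJoin_append, pvJoin_cons, pvJoin_nil, String.append_assoc]
      · rw [if_neg hm]
        have cl : ((P.length : Int) + 1) = (((P ++ [m]).length : Nat) : Int) := by simp
        have eq2 : (P ++ m :: R') = (P ++ [m]) ++ R' := by simp
        rw [cl, eq2, ih R' (P ++ [m]) (by simp at hR ⊢; omega)]
        rw [pvQuote, if_neg hm]
        simp [pvJoin_append, pvJoin_cons, pvJoin_nil, String.append_assoc]

lemma pvGo (P R : List String) :
    eval_metro (P ++ R) (P.length : Int) = PySem.Str.join "" P ++ pvQuote R :=
  pvGoAux R.length R P le_rfl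

lemma pvMain_nonneg (expr : List String) (pos : Int) (h0 : 0 ≤ pos) :
    eval_metro expr pos =
      PySem.Str.join "" (expr.take pos.toNat) ++ pvQuote (expr.drop pos.toNat) := by
  rcases (by omega : (expr.length : Int) ≤ pos ∨ pos < (expr.length : Int)) with h | h
  · rw [eval_metro_ge _ _ h]
    rw [List.take_of_length_le (by omega), List.drop_of_length_le (by omega), pvQuote_nil]
    simp
  · have hgo := pvGo (expr.take pos.toNat) (expr.drop pos.toNat)
    rw [List.take_append_drop] at hgo
    have hl : ((expr.take pos.toNat).length : Int) = pos := by
      simp [List.length_take]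
      omega
    rw [hl] at hgo
    exact hgo

-- ===== VERDICT (by name: the statement is the Claim_ definition above) =====
theorem eval_metro_spec : Claim_equal_eval_metro := by
  intro expr pos _hdom hpre
  unfold Pre_eval_metro at hpre
  unfold Spec_eval_metro
  rw [pvMain_nonneg expr pos hpre]
  simp only [eval_metro_alt]
  rw [max_eq_left hpre]
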